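-- pv_equiv track=rewrite | github.com/pypi-data/pypi-mirror-361 | packages/lmcv-tools/lmcv_tools-0.0.32-py3-none-any.whl/lmcv_tools/commands/reorder.py | get_level_structure
-- ===== SOURCE A (Python) =====
-- def get_level_structure(node: int, graph: dict) -> list[dict]:
--    # Variáveis Iniciais
--    level_structure = list()
--    max_level_length = 0
--    leveled_nodes = {node}
--
--    # Calculando Nível Inicial
--    node_degree = len(graph[node])
--    current_level = {node: node_degree}
--
--    # Loop para cada Nível
--    while 1:
--       # Adicionando Nível Atual à Lista de Níveis
--       level_structure.append(current_level)
--       next_level = dict()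
--
--       # Verificando Adjacência do Nível Atual
--       for n in current_level:
--          adjacent_nodes = graph[n]
--          for a in adjacent_nodes:
--             if a not in leveled_nodes:
--                leveled_nodes.add(a)
--                next_level[a] = len(graph[a])
--
--       # Verificando se o Nível Atual é Vazio
--       if len(next_level) == 0:
--          break
--
--       # Verificando se o Comprimento do Nível é o Maior
--       if len(next_level) > max_level_length:
--          max_level_length = len(next_level)
--
--       # Intercambiando Níveis
--       current_level = next_level
--
--    return level_structure, max_level_length
-- ===== SOURCE B (Python) =====
-- def get_level_structure(node: int, graph: dict) -> list[dict]:
--    # Recursive level expansion: each call maps the frontier to its degree dict,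
--    # flattens all adjacencies, keeps the first occurrence of each unseen node,
--    # and recurses; the max level length is taken in one pass at the end.
--    def expand(frontier, seen):
--       level = {n: len(graph[n]) for n in frontier}
--       nxt = []
--       for a in [a for n in frontier for a in graph[n]]:
--          if a not in seen:
--             seen.add(a)
--             nxt.append(a)
--       if not nxt:
--          return [level]
--       return [level] + expand(nxt, seen)
--    levels = expand([node], {node})
--    max_level_length = max((len(d) for d in levels[1:]), default=0)
--    return levels, max_level_length
-- ===== Notes on version B (the rewrite author's own statement) =====
-- stated objective: alternative
-- what changed: Replaces A's imperative while-loop with nested per-node/per-neighbour dict-building passes and a running max by a recursive level expansion: each call builds the level dict by a comprehension over the frontier list, flattens all adjacencies into one list and dedups it in a single pass, recurses on the new frontier, and the max level length is computed in one final pass over levels[1:].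
import Mathlib
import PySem

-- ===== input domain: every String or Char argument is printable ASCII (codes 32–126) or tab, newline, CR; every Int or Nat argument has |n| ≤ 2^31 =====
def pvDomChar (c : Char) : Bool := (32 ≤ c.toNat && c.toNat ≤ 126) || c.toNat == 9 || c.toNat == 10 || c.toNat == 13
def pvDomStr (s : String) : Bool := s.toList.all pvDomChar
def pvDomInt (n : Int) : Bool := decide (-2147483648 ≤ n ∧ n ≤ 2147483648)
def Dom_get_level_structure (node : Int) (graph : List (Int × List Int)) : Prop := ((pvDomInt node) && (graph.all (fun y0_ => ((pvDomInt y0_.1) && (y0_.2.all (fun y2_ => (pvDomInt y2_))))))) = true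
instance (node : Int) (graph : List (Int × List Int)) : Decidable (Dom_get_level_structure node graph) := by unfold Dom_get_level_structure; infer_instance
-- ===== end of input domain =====

-- B re-implements A's imperative level-batch loop as a recursive level expansion (flatten the
-- frontier's adjacencies, dedup once, recurse; max of levels[1:] in one final pass); equal cost,
-- return values proved equal under Pre_. B mutates no argument; A mutates none either.

-- ===== PORT A =====
-- shared lookup helpers: graph[n] (Python dict lookup; total via default [] — Pre_ excludes missing keys) and len(graph[n])
def pvAdj (graph : List (Int × List Int)) (n : Int) : List Int :=
  PySem.Dict.getD (PySem.Dict.mk graph) n []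
def pvDeg (graph : List (Int × List Int)) (n : Int) : Int :=
  PySem.List.len (pvAdj graph n)
-- termination machinery for A's 'while 1' loop: every node it ever adds to leveled_nodes lies in pvAll
def pvAll (graph : List (Int × List Int)) : List Int :=
  graph.map Prod.fst ++ graph.flatMap Prod.snd
def pvUnseen (graph : List (Int × List Int)) (s : PySem.Set Int) : Nat :=
  ((pvAll graph).filter (fun x => !(PySem.Set.contains s x))).length
-- pvFresh s adj = the unseen-so-far elements of adj, first occurrences only, in order
def pvFresh (s : PySem.Set Int) : List Int → List Int
  | [] => []
  | a :: t => if PySem.Set.contains s a then pvFresh s t else a :: pvFresh (s ++ [a]) t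

lemma pvContains_iff (s : PySem.Set Int) (x : Int) : PySem.Set.contains s x = true ↔ x ∈ s := by
  simp [PySem.Set.contains]

lemma pvAdj_sub (graph : List (Int × List Int)) (n : Int) :
    ∀ a ∈ pvAdj graph n, a ∈ pvAll graph := by
  intro a ha
  unfold pvAdj PySem.Dict.getD PySem.Dict.get? at ha
  cases hf : List.find? (fun p => p.1 == n) (PySem.Dict.mk graph).items with
  | none => rw [hf] at ha; simp at ha
  | some p =>
    rw [hf] at ha
    simp only [Option.map_some, Option.getD_some] at ha
    have hp : p ∈ graph := List.mem_of_find?_eq_some hf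
    unfold pvAll
    exact List.mem_append_right _ (List.mem_flatMap.mpr ⟨p, hp, ha⟩)

lemma pvFilterLt {α : Type} (p q : α → Bool) (h : ∀ x, q x = true → p x = true) :
    ∀ (l : List α) (a : α), a ∈ l → p a = true → q a = false →
      (l.filter q).length < (l.filter p).length := by
  intro l
  induction l with
  | nil => intro a ha; simp at ha
  | cons x l ih =>
    intro a ha hpa hqa
    rcases List.mem_cons.mp ha with rfl | ha'
    · simp only [List.filter_cons, hqa, hpa]
      simp only [Bool.false_eq_true, if_false, if_true, List.length_cons]
      have h1 : (l.filter q).length ≤ (l.filter p).length := by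
        rw [← List.countP_eq_length_filter, ← List.countP_eq_length_filter]
        exact List.countP_mono_left (fun x _ hx => h x hx)
      omega
    · have hlt := ih a ha' hpa hqa
      cases hq : q x
      · simp only [List.filter_cons, hq, Bool.false_eq_true, if_false]
        cases hp : p x
        · simp only [Bool.false_eq_true, if_false]; omega
        · simp only [if_true, List.length_cons]; omega
      · have hp := h x hq
        simp only [List.filter_cons, hq, hp, if_true, List.length_cons]
        omega

lemma pvFreshDrop (graph : List (Int × List Int)) :
    ∀ (new : List Int) (s : PySem.Set Int), new.Nodup →
      (∀ a ∈ new, PySem.Set.contains s a = false ∧ a ∈ pvAll graph) →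
      pvUnseen graph (s ++ new) + new.length ≤ pvUnseen graph s := by
  intro new
  induction new with
  | nil => intro s _ _; simp
  | cons a t ih =>
    intro s hnd hmem
    have hns : PySem.Set.contains s a = false := (hmem a (List.mem_cons_self)).1
    have hall : a ∈ pvAll graph := (hmem a (List.mem_cons_self)).2
    have hstep : pvUnseen graph (s ++ [a]) + 1 ≤ pvUnseen graph s := by
      have hlt := pvFilterLt (fun x => !PySem.Set.contains s x)
        (fun x => !PySem.Set.contains (s ++ [a]) x)
        (by intro x hx; simp [PySem.Set.contains] at *; tauto)
        (pvAll graph) a hall (by simpa [PySem.Set.contains] using hns)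
        (by simp [PySem.Set.contains])
      unfold pvUnseen
      omega
    have htail := ih (s ++ [a])
      (List.Nodup.of_cons hnd)
      (by
        intro b hb
        have hb1 := hmem b (List.mem_cons_of_mem _ hb)
        have hba : b ≠ a := fun h => (List.nodup_cons.mp hnd).1 (h ▸ hb)
        constructor
        · simp [PySem.Set.contains] at *
          exact ⟨hb1.1, hba⟩
        · exact hb1.2)
    rw [List.append_cons]
    simp only [List.length_cons]
    omega

lemma pvFresh_props : ∀ (adj : List Int) (s : PySem.Set Int),
    (pvFresh s adj).Nodup ∧ ∀ a ∈ pvFresh s adj, PySem.Set.contains s a = false ∧ a ∈ adj := by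
  intro adj
  induction adj with
  | nil => intro s; exact ⟨List.nodup_nil, by simp [pvFresh]⟩
  | cons a t ih =>
    intro s
    by_cases h : PySem.Set.contains s a = true
    · rw [show pvFresh s (a :: t) = pvFresh s t from by rw [pvFresh, if_pos h]]
      obtain ⟨hnd, hm⟩ := ih s
      exact ⟨hnd, fun x hx => ⟨(hm x hx).1, List.mem_cons_of_mem _ (hm x hx).2⟩⟩
    · have hb : PySem.Set.contains s a = false := Bool.eq_false_iff.mpr h
      rw [show pvFresh s (a :: t) = a :: pvFresh (s ++ [a]) t from by rw [pvFresh, if_neg h]]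
      obtain ⟨hnd, hm⟩ := ih (s ++ [a])
      refine ⟨List.nodup_cons.mpr ⟨?_, hnd⟩, ?_⟩
      · intro hx
        have hf := (hm a hx).1
        have ht : PySem.Set.contains (s ++ [a]) a = true :=
          (pvContains_iff _ _).mpr (List.mem_append_right _ (List.mem_singleton.mpr rfl))
        rw [hf] at ht; exact Bool.noConfusion ht
      · intro x hx
        rcases List.mem_cons.mp hx with rfl | hx'
        · exact ⟨hb, List.mem_cons_self⟩
        · have h1 := (hm x hx').1
          have h2 : PySem.Set.contains s x = false := by
            cases hc : PySem.Set.contains s x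
            · rfl
            · have ht : PySem.Set.contains (s ++ [a]) x = true :=
                (pvContains_iff _ _).mpr (List.mem_append_left _ ((pvContains_iff _ _).mp hc))
              rw [h1] at ht; exact Bool.noConfusion ht
          exact ⟨h2, List.mem_cons_of_mem _ (hm x hx').2⟩

-- the inner 'for a in adjacent_nodes' loop of A, characterised via pvFresh
lemma pvFoldA_eq (graph : List (Int × List Int)) :
    ∀ (adj : List Int) (s : PySem.Set Int) (d : PySem.Dict Int Int),
      (∀ k, d.contains k = true → PySem.Set.contains s k = true) →
      adj.foldl (fun st a => if PySem.Set.contains st.1 a then st else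
          (PySem.Set.add st.1 a, PySem.Dict.insert st.2 a (pvDeg graph a))) (s, d)
        = (s ++ pvFresh s adj, PySem.Dict.mk (d.items ++ (pvFresh s adj).map (fun a => (a, pvDeg graph a)))) := by
  intro adj
  induction adj with
  | nil => intro s d _; simp [pvFresh]
  | cons a t ih =>
    intro s d hk
    by_cases h : PySem.Set.contains s a = true
    · rw [List.foldl_cons, if_pos h, show pvFresh s (a :: t) = pvFresh s t from by rw [pvFresh, if_pos h]]
      exact ih s d hk
    · have hb : PySem.Set.contains s a = false := Bool.eq_false_iff.mpr h
      have hdc : d.contains a = false := by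
        cases hdc : d.contains a
        · rfl
        · have hx := hk a hdc
          rw [hb] at hx; exact Bool.noConfusion hx
      rw [List.foldl_cons, if_neg h, show pvFresh s (a :: t) = a :: pvFresh (s ++ [a]) t from by rw [pvFresh, if_neg h]]
      have hadd : PySem.Set.add s a = s ++ [a] := by
        unfold PySem.Set.add; rw [hb]; simp
      rw [hadd, ih (s ++ [a]) (d.insert a (pvDeg graph a)) (by
        intro k hkk
        rw [PySem.Dict.contains_insert] at hkk
        rcases (Bool.or_eq_true _ _).mp hkk with h1 | h1
        · have hka : k = a := by simpa using h1
          subst hka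
          exact (pvContains_iff _ _).mpr (List.mem_append_right _ (List.mem_singleton.mpr rfl))
        · exact (pvContains_iff _ _).mpr (List.mem_append_left _ ((pvContains_iff _ _).mp (hk k h1))))]
      rw [PySem.Dict.items_insert_of_not_contains d _ hdc]
      simp

lemma pvFresh_append (s : PySem.Set Int) (l1 l2 : List Int) :
    pvFresh s (l1 ++ l2) = pvFresh s l1 ++ pvFresh (s ++ pvFresh s l1) l2 := by
  induction l1 generalizing s with
  | nil => simp [pvFresh]
  | cons a t ih =>
    by_cases h : PySem.Set.contains s a = true
    · have e : ∀ r, pvFresh s (a :: r) = pvFresh s r := fun r => by rw [pvFresh, if_pos h]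
      rw [List.cons_append, e, e]
      exact ih s
    · have e : ∀ r, pvFresh s (a :: r) = a :: pvFresh (s ++ [a]) r := fun r => by rw [pvFresh, if_neg h]
      rw [List.cons_append, e, e, ih (s ++ [a])]
      simp [List.append_assoc]

-- the whole 'for n in current_level: for a in graph[n]' double loop of A, flattened via pvFresh
def pvStepA (graph : List (Int × List Int)) (ns : List Int) (s : PySem.Set Int) (d : PySem.Dict Int Int) :
    PySem.Set Int × PySem.Dict Int Int :=
  ns.foldl (fun st n => (pvAdj graph n).foldl (fun st a => if PySem.Set.contains st.1 a then st else
      (PySem.Set.add st.1 a, PySem.Dict.insert st.2 a (pvDeg graph a))) st) (s, d)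

lemma pvStepA_eq (graph : List (Int × List Int)) :
    ∀ (ns : List Int) (s : PySem.Set Int) (d : PySem.Dict Int Int),
      (∀ k, d.contains k = true → PySem.Set.contains s k = true) →
      pvStepA graph ns s d
        = (s ++ pvFresh s (ns.flatMap (pvAdj graph)),
           PySem.Dict.mk (d.items ++ (pvFresh s (ns.flatMap (pvAdj graph))).map (fun a => (a, pvDeg graph a)))) := by
  unfold pvStepA
  intro ns
  induction ns with
  | nil => intro s d _; simp [pvFresh]
  | cons n t ih =>
    intro s d hk
    rw [List.foldl_cons, pvFoldA_eq graph (pvAdj graph n) s d hk]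
    have hk' : ∀ k, (PySem.Dict.mk (d.items ++ (pvFresh s (pvAdj graph n)).map (fun a => (a, pvDeg graph a)))).contains k = true →
        PySem.Set.contains (s ++ pvFresh s (pvAdj graph n)) k = true := by
      intro k hkk
      rw [PySem.Dict.contains_mk, List.any_append] at hkk
      rcases (Bool.or_eq_true _ _).mp hkk with h1 | h1
      · have : d.contains k = true := by rw [PySem.Dict.contains]; exact h1
        exact (pvContains_iff _ _).mpr (List.mem_append_left _ ((pvContains_iff _ _).mp (hk k this)))
      · have : k ∈ pvFresh s (pvAdj graph n) := by
          rcases List.any_eq_true.mp h1 with ⟨p, hp, hpk⟩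
          rcases List.mem_map.mp hp with ⟨a, ha, rfl⟩
          have : a = k := by simpa using hpk
          exact this ▸ ha
        exact (pvContains_iff _ _).mpr (List.mem_append_right _ this)
    rw [ih (s ++ pvFresh s (pvAdj graph n)) _ hk']
    rw [List.flatMap_cons, pvFresh_append s (pvAdj graph n) (t.flatMap (pvAdj graph))]
    simp [List.append_assoc, List.map_append]

-- A's 'while 1' loop: state = (leveled_nodes, current_level, level_structure, max_level_length)
def loopA (graph : List (Int × List Int)) (s : PySem.Set Int) (cur : PySem.Dict Int Int)
    (acc : List (List (Int × Int))) (ml : Int) : (List (List (Int × Int))) × Int :=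
  let acc' := acc ++ [cur.items]                  -- level_structure.append(current_level)
  let sn := pvStepA graph cur.keys s PySem.Dict.empty
  if h : sn.2.items = [] then (acc', ml)          -- if len(next_level) == 0: break
  else
    loopA graph sn.1 sn.2 acc'
      (if ((PySem.Dict.size sn.2 : Int)) > ml then (PySem.Dict.size sn.2 : Int) else ml)
termination_by pvUnseen graph s
decreasing_by
  replace h : ¬(pvStepA graph cur.keys s PySem.Dict.empty).2.items = [] := h
  rw [pvStepA_eq graph cur.keys s PySem.Dict.empty
    (fun k hkk => by rw [PySem.Dict.contains_empty] at hkk; exact Bool.noConfusion hkk)] at h ⊢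
  obtain ⟨hnd, hmem⟩ := pvFresh_props (cur.keys.flatMap (pvAdj graph)) s
  have hmem' : ∀ a ∈ pvFresh s (cur.keys.flatMap (pvAdj graph)),
      PySem.Set.contains s a = false ∧ a ∈ pvAll graph := by
    intro a ha
    rcases List.mem_flatMap.mp (hmem a ha).2 with ⟨n, _, han⟩
    exact ⟨(hmem a ha).1, pvAdj_sub graph n a han⟩
  have hd := pvFreshDrop graph (pvFresh s (cur.keys.flatMap (pvAdj graph))) s hnd hmem'
  have hne : pvFresh s (cur.keys.flatMap (pvAdj graph)) ≠ [] := by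
    intro hnil
    rw [hnil] at h
    simp [PySem.Dict.empty] at h
  cases hF : pvFresh s (cur.keys.flatMap (pvAdj graph)) with
  | nil => exact absurd hF hne
  | cons b t =>
    rw [hF] at hd
    simp only [List.length_cons] at hd
    exact (show pvUnseen graph (s ++ b :: t) < pvUnseen graph s by omega)

def get_level_structure (node : Int) (graph : List (Int × List Int)) : (List (List (Int × Int))) × Int :=
  let leveled := PySem.Set.add PySem.Set.empty node                        -- leveled_nodes = {node}
  let node_degree := pvDeg graph node                                      -- node_degree = len(graph[node])
  let cur := PySem.Dict.insert PySem.Dict.empty node node_degree           -- current_level = {node: node_degree}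
  loopA graph leveled cur [] 0

-- ===== PORT B =====
-- expand(frontier, seen): level dict by comprehension over the frontier (duplicate-free by
-- construction, so a plain map), flatten all adjacencies, keep first occurrences of unseen nodes
-- in one pass, recurse.  The Nat fuel only makes the recursion structural: the level count never
-- exceeds |pvAll graph| + 1, so with the fuel get_level_structure_alt passes the base case is unreachable.
def expandB (graph : List (Int × List Int)) : Nat → List Int → PySem.Set Int → List (List (Int × Int))
  | 0, frontier, _ => [frontier.map (fun n => (n, pvDeg graph n))]
  | fuel + 1, frontier, seen =>
    let r := (frontier.flatMap (fun n => pvAdj graph n)).foldl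
      (fun st a => if PySem.Set.contains st.1 a then st else (PySem.Set.add st.1 a, st.2 ++ [a]))
      (seen, ([] : List Int))
    if r.2.isEmpty then [frontier.map (fun n => (n, pvDeg graph n))]
    else frontier.map (fun n => (n, pvDeg graph n)) :: expandB graph fuel r.2 r.1

def get_level_structure_alt (node : Int) (graph : List (Int × List Int)) : (List (List (Int × Int))) × Int :=
  let levels := expandB graph ((pvAll graph).length + 1) [node] (PySem.Set.add PySem.Set.empty node)
  let max_level_length := PySem.List.maxD
    ((PySem.List.slice levels (some 1) none).map (fun d => PySem.List.len d)) (fun x => x) 0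
  (levels, max_level_length)

-- ===== PRECONDITION & SPEC =====
-- adjacency closure of the root, saturated in at most |pvAll graph| + 1 rounds (enough for the fixpoint)
def pvReach (graph : List (Int × List Int)) : Nat → PySem.Set Int → PySem.Set Int
  | 0, s => s
  | n + 1, s => pvReach graph n (PySem.Set.update s (s.flatMap (fun x => pvAdj graph x)))

-- Pre_ excludes the inputs on which A raises KeyError (every node in the adjacency closure of the root must be
-- a key, i.e. all of A's dict lookups succeed); the Nodup conjunct only rules out association lists with
-- duplicate keys, which do not represent a Python dict at all.
def Pre_get_level_structure (node : Int) (graph : List (Int × List Int)) : Prop :=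
  (graph.map Prod.fst).Nodup ∧
  ∀ x ∈ pvReach graph ((pvAll graph).length + 1) [node], PySem.Dict.contains (PySem.Dict.mk graph) x = true
instance (node : Int) (graph : List (Int × List Int)) : Decidable (Pre_get_level_structure node graph) := by
  unfold Pre_get_level_structure; infer_instance
def pvWitness_get_level_structure : Int × (List (Int × List Int)) := (0, [(0, [1]), (1, [0, 2]), (2, [])])

def Spec_get_level_structure (node : Int) (graph : List (Int × List Int)) (out : (List (List (Int × Int))) × Int) : Prop := out = get_level_structure_alt node graph
instance (node : Int) (graph : List (Int × List Int)) (out : (List (List (Int × Int))) × Int) : Decidable (Spec_get_level_structure node graph out) := by unfold Spec_get_level_structure; infer_instance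

-- ===== CLAIM (what is proved, stated in full; the proofs are below) =====
def Claim_equal_get_level_structure : Prop := ∀ (node : Int) (graph : List (Int × List Int)), Dom_get_level_structure node graph → Pre_get_level_structure node graph → Spec_get_level_structure node graph (get_level_structure node graph)

-- ===== LEMMAS AND PROOFS =====

-- B's single dedup pass, characterised by the same pvFresh
lemma pvFoldB_eq :
    ∀ (adj : List Int) (s : PySem.Set Int) (l : List Int),
      adj.foldl (fun st a => if PySem.Set.contains st.1 a then st else
          (PySem.Set.add st.1 a, st.2 ++ [a])) (s, l)
        = (s ++ pvFresh s adj, l ++ pvFresh s adj) := by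
  intro adj
  induction adj with
  | nil => intro s l; simp [pvFresh]
  | cons a t ih =>
    intro s l
    by_cases h : PySem.Set.contains s a = true
    · rw [List.foldl_cons, if_pos h, show pvFresh s (a :: t) = pvFresh s t from by rw [pvFresh, if_pos h]]
      exact ih s l
    · have hb : PySem.Set.contains s a = false := Bool.eq_false_iff.mpr h
      have hadd : PySem.Set.add s a = s ++ [a] := by
        unfold PySem.Set.add; rw [hb]; simp
      rw [List.foldl_cons, if_neg h, show pvFresh s (a :: t) = a :: pvFresh (s ++ [a]) t from by rw [pvFresh, if_neg h]]
      rw [hadd, ih (s ++ [a]) (l ++ [a])]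
      simp

lemma expandB_succ (graph : List (Int × List Int)) (fuel : Nat) (cur : List Int) (s : PySem.Set Int) :
    expandB graph (fuel + 1) cur s
      = if (pvFresh s (cur.flatMap (pvAdj graph))).isEmpty
          then [cur.map (fun n => (n, pvDeg graph n))]
          else cur.map (fun n => (n, pvDeg graph n))
            :: expandB graph fuel (pvFresh s (cur.flatMap (pvAdj graph))) (s ++ pvFresh s (cur.flatMap (pvAdj graph))) := by
  rw [expandB]
  rw [pvFoldB_eq (cur.flatMap (fun n => pvAdj graph n)) s []]
  simp

lemma expandB_head (graph : List (Int × List Int)) (fuel : Nat) (cur : List Int) (s : PySem.Set Int) :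
    ∃ t, expandB graph fuel cur s = (cur.map (fun n => (n, pvDeg graph n))) :: t := by
  cases fuel with
  | zero => exact ⟨[], rfl⟩
  | succ f =>
    rw [expandB_succ]
    split
    · exact ⟨[], rfl⟩
    · exact ⟨_, rfl⟩

def pvTailMax (ml : Int) (lvls : List (List (Int × Int))) : Int :=
  (lvls.drop 1).foldl (fun m l => if ((l.length : Int)) > m then (l.length : Int) else m) ml

lemma loopA_unfold (graph : List (Int × List Int)) (s : PySem.Set Int) (cur : PySem.Dict Int Int)
    (acc : List (List (Int × Int))) (ml : Int) :
    loopA graph s cur acc ml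
      = if (pvStepA graph cur.keys s PySem.Dict.empty).2.items = [] then (acc ++ [cur.items], ml)
        else loopA graph (pvStepA graph cur.keys s PySem.Dict.empty).1 (pvStepA graph cur.keys s PySem.Dict.empty).2
          (acc ++ [cur.items])
          (if ((PySem.Dict.size (pvStepA graph cur.keys s PySem.Dict.empty).2 : Int)) > ml
            then (PySem.Dict.size (pvStepA graph cur.keys s PySem.Dict.empty).2 : Int) else ml) := by
  rw [loopA.eq_def]
  rfl

lemma pvKeysMkMap (graph : List (Int × List Int)) (cur : List Int) :
    (PySem.Dict.mk (cur.map (fun n => (n, pvDeg graph n)))).keys = cur := by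
  show (cur.map (fun n => (n, pvDeg graph n))).map (fun x => x.1) = cur
  rw [List.map_map]
  rw [show ((fun x : Int × Int => x.1) ∘ fun n : Int => (n, pvDeg graph n)) = id from rfl, List.map_id]

-- the bridge: A's loop, run on the dict image of a frontier list, equals B's recursive expansion
lemma pvBridge (graph : List (Int × List Int)) :
    ∀ (m fuel : Nat) (s : PySem.Set Int) (cur : List Int)
      (acc : List (List (Int × Int))) (ml : Int),
      pvUnseen graph s ≤ m → pvUnseen graph s < fuel →
      loopA graph s (PySem.Dict.mk (cur.map (fun n => (n, pvDeg graph n)))) acc ml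
        = (acc ++ expandB graph fuel cur s, pvTailMax ml (expandB graph fuel cur s)) := by
  intro m
  induction m with
  | zero =>
    intro fuel s cur acc ml hm hf
    obtain ⟨g, rfl⟩ : ∃ g, fuel = g + 1 := ⟨fuel - 1, by omega⟩
    rw [loopA_unfold, pvKeysMkMap, pvStepA_eq graph cur s PySem.Dict.empty
      (fun k hkk => by rw [PySem.Dict.contains_empty] at hkk; exact Bool.noConfusion hkk)]
    have hnil : pvFresh s (cur.flatMap (pvAdj graph)) = [] := by
      cases hF : pvFresh s (cur.flatMap (pvAdj graph)) with
      | nil => rfl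
      | cons b t =>
        exfalso
        obtain ⟨hnd, hmem⟩ := pvFresh_props (cur.flatMap (pvAdj graph)) s
        rw [hF] at hmem
        have hfresh : PySem.Set.contains s b = false := (hmem b List.mem_cons_self).1
        rcases List.mem_flatMap.mp (hmem b List.mem_cons_self).2 with ⟨n, _, hbn⟩
        have hball : b ∈ pvAll graph := pvAdj_sub graph n b hbn
        have hbf : b ∈ (pvAll graph).filter (fun x => !(PySem.Set.contains s x)) :=
          List.mem_filter.mpr ⟨hball, by rw [hfresh]; rfl⟩
        have hpos : 0 < pvUnseen graph s := List.length_pos_of_mem hbf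
        omega
    rw [expandB_succ, hnil]
    simp [pvTailMax, PySem.Dict.empty]
  | succ m ih =>
    intro fuel s cur acc ml hm hf
    obtain ⟨g, rfl⟩ : ∃ g, fuel = g + 1 := ⟨fuel - 1, by omega⟩
    rw [loopA_unfold, pvKeysMkMap, pvStepA_eq graph cur s PySem.Dict.empty
      (fun k hkk => by rw [PySem.Dict.contains_empty] at hkk; exact Bool.noConfusion hkk)]
    rw [expandB_succ]
    cases hF : pvFresh s (cur.flatMap (pvAdj graph)) with
    | nil =>
      simp [pvTailMax, PySem.Dict.empty]
    | cons b t =>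
      obtain ⟨hnd, hmem⟩ := pvFresh_props (cur.flatMap (pvAdj graph)) s
      have hmem' : ∀ a ∈ pvFresh s (cur.flatMap (pvAdj graph)),
          PySem.Set.contains s a = false ∧ a ∈ pvAll graph := by
        intro a ha
        rcases List.mem_flatMap.mp (hmem a ha).2 with ⟨n, _, han⟩
        exact ⟨(hmem a ha).1, pvAdj_sub graph n a han⟩
      have hd := pvFreshDrop graph (pvFresh s (cur.flatMap (pvAdj graph))) s hnd hmem'
      rw [hF] at hd
      simp only [List.length_cons] at hd
      have hun : pvUnseen graph (s ++ b :: t) ≤ m := by omega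
      have hug : pvUnseen graph (s ++ b :: t) < g := by omega
      have hrec := ih g (s ++ b :: t) (b :: t) (acc ++ [cur.map (fun n => (n, pvDeg graph n))])
        (if (((b :: t).length : Int)) > ml then (((b :: t).length : Int)) else ml) hun hug
      have hni : ¬((PySem.Dict.mk ((PySem.Dict.empty : PySem.Dict Int Int).items ++ (b :: t).map (fun a => (a, pvDeg graph a)))).items = []) := by
        simp [PySem.Dict.empty]
      rw [if_neg hni, if_neg (show ¬((b :: t).isEmpty = true) by simp)]
      have hempty : (PySem.Dict.empty : PySem.Dict Int Int).items = [] := rfl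
      have hsize : ∀ l : List (Int × Int), (PySem.Dict.mk l).size = l.length := fun l => rfl
      simp only [hempty, List.nil_append, hsize, List.length_map]
      rw [hrec]
      obtain ⟨tl, htl⟩ := expandB_head graph g (b :: t) (s ++ b :: t)
      refine Prod.ext ?_ ?_
      · simp
      · simp [pvTailMax, htl, List.foldl_cons]

lemma pvRunMax_eq_maxD :
    ∀ (xs : List Int), (∀ x ∈ xs, 0 ≤ x) →
      xs.foldl (fun m x => if x > m then x else m) 0 = PySem.List.maxD xs (fun x => x) 0 := by
  intro xs hpos
  cases xs with
  | nil =>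
    unfold PySem.List.maxD
    rw [(PySem.List.max?_eq_none_iff [] _).mpr rfl]
    rfl
  | cons x t =>
    unfold PySem.List.maxD
    rw [PySem.List.max?_id_cons]
    simp only [Option.getD_some]
    have hfun : (fun (m x : Int) => if x > m then x else m) = fun m x => max m x := by
      funext m y
      by_cases h : y ≤ m
      · rw [if_neg (not_lt.mpr h), max_eq_left h]
      · rw [if_pos (not_le.mp h), max_eq_right (le_of_lt (not_le.mp h))]
    rw [List.foldl_cons, hfun]
    have hx : (if x > 0 then x else (0 : Int)) = x := by
      have := hpos x List.mem_cons_self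
      split <;> omega
    rw [hx]

lemma pvMaxEq (L : List (List (Int × Int))) :
    pvTailMax 0 L = PySem.List.maxD ((PySem.List.slice L (some 1) none).map (fun d => PySem.List.len d)) (fun x => x) 0 := by
  rw [PySem.List.slice_from L (by norm_num : (0:Int) ≤ 1)]
  have h1 : ((1 : Int)).toNat = 1 := rfl
  rw [h1]
  have hlen : (L.drop 1).map (fun d => PySem.List.len d) = (L.drop 1).map (fun d => ((d.length : Int))) := by
    simp [PySem.List.len_eq]
  rw [hlen, ← pvRunMax_eq_maxD _ (by intro x hx; rcases List.mem_map.mp hx with ⟨d, _, rfl⟩; positivity)]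
  unfold pvTailMax
  rw [List.foldl_map]

theorem get_level_structure_spec : Claim_equal_get_level_structure := by
  intro node graph _ _
  show get_level_structure node graph = get_level_structure_alt node graph
  have hsn : (PySem.Set.add PySem.Set.empty node : PySem.Set Int) = [node] := rfl
  have hdict : (PySem.Dict.insert PySem.Dict.empty node (pvDeg graph node) : PySem.Dict Int Int)
      = PySem.Dict.mk ([node].map (fun n => (n, pvDeg graph n))) := rfl
  have hfu : pvUnseen graph [node] < (pvAll graph).length + 1 := by
    have : pvUnseen graph [node] ≤ (pvAll graph).length := by
      unfold pvUnseen
      exact List.length_filter_le _ _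
    omega
  have hA : get_level_structure node graph
      = ([] ++ expandB graph ((pvAll graph).length + 1) [node] [node],
         pvTailMax 0 (expandB graph ((pvAll graph).length + 1) [node] [node])) := by
    show loopA graph (PySem.Set.add PySem.Set.empty node)
        (PySem.Dict.insert PySem.Dict.empty node (pvDeg graph node)) [] 0 = _
    rw [hsn, hdict]
    exact pvBridge graph (pvUnseen graph [node]) ((pvAll graph).length + 1) [node] [node] [] 0
      (le_refl _) hfu
  rw [hA]
  show _ = (expandB graph ((pvAll graph).length + 1) [node] (PySem.Set.add PySem.Set.empty node),
    PySem.List.maxD ((PySem.List.slice (expandB graph ((pvAll graph).length + 1) [node] (PySem.Set.add PySem.Set.empty node)) (some 1) none).map (fun d => PySem.List.len d)) (fun x => x) 0)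
  rw [hsn]
  exact Prod.ext (by simp) (pvMaxEq _)
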